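-- pv_equiv track=rewrite | github.com/fab-jul/fjcommon | fjcommon/qsuba.py | _join_args
-- ===== SOURCE A (Python) =====
-- def _join_args(call, nargs=None):
--     """
--     Join arguments in call together.
--     :param call:
--     :param nargs:  dict from arguments names to how many args it takes, default 1 for all.
--     :return:
--     """
--     if not nargs:
--         nargs = {}
--     assert all(not k.startswith('-') for k in nargs.keys())
--     out = []
--     current_arg = []
--     for c in call:
--         if len(current_arg) > 0:
--             if c.startswith('-') or (nargs.get(current_arg[0].strip('--'), 1) + 1 == len(current_arg)):
--                 out.append(' '.join(current_arg))
--                 current_arg = []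
--         current_arg.append(c)
--     if current_arg:
--         out.append(' '.join(current_arg))
--     return out
-- ===== SOURCE B (Python) =====
-- def _join_args(call, nargs=None):
--     if not nargs:
--         nargs = {}
--     assert all(not k.startswith('-') for k in nargs.keys())
--     # Stage 1: one arithmetic scan over indices that records only the cut
--     # positions (group starts); no group buffer is kept.
--     cuts = []
--     start = 0
--     limit = 0
--     for j, c in enumerate(call):
--         if j == 0 or c.startswith('-') or j - start == limit + 1:
--             cuts.append(j)
--             start = j
--             limit = nargs.get(c.strip('-'), 1)
--     # Stage 2: the output is the join of the slices between consecutive cuts.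
--     return [' '.join(call[a:b]) for a, b in zip(cuts, cuts[1:] + [len(call)])]
-- ===== Notes on version B (the rewrite author's own statement) =====
-- stated objective: alternative
-- what changed: Replaces A's single accumulator pass that maintains a group buffer and flushes it with a staged computation: stage 1 scans indices and records only the cut positions (group-start indices) with pure index arithmetic (j - start == limit + 1), keeping no group contents; stage 2 produces the output as a comprehension joining the slices between consecutive cuts.
import Mathlib
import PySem

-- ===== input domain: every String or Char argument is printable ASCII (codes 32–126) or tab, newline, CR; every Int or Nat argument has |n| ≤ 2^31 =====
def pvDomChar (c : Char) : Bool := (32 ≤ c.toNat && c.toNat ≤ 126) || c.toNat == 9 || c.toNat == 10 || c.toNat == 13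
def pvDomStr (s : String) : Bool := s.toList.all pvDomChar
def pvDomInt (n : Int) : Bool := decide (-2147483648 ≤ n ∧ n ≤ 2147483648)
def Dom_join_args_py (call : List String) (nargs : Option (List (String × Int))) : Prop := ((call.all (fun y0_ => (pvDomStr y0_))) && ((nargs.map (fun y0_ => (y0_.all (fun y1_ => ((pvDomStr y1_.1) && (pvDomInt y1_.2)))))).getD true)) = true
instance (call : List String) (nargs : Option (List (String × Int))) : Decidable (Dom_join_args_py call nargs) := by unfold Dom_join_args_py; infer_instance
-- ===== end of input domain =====

-- B replaces A's group-buffer accumulator pass with a staged computation: stage 1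
-- records only the cut indices by index arithmetic, stage 2 joins the slices
-- between consecutive cuts (alternative decomposition, same cost).

-- ===== PORT A =====
-- one step of A's `for c in call` loop; state = (out, current_arg); a flush
-- immediately followed by `current_arg.append(c)` yields [c]
def joinArgsStepA (d : PySem.Dict String Int) (s : List String × List String) (c : String) : List String × List String :=
  let out := s.1
  let cur := s.2
  if 0 < cur.length then
    if PySem.Str.startswith c "-" ||
       (PySem.Dict.getD d (PySem.Str.stripChars (cur.headD "") "--") 1 + 1 == (cur.length : Int)) then
      (out ++ [PySem.Str.join " " cur], [c])
    else (out, cur ++ [c])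
  else (out, cur ++ [c])

def join_args_py (call : List String) (nargs : Option (List (String × Int))) : List String :=
  -- `if not nargs: nargs = {}`: None and the empty dict both become {}
  let d : PySem.Dict String Int := PySem.Dict.mk (nargs.getD [])
  -- the `assert all(not k.startswith('-') ...)` raises exactly outside Pre_join_args_py
  let r := call.foldl (joinArgsStepA d) ([], [])
  if r.2 ≠ [] then r.1 ++ [PySem.Str.join " " r.2] else r.1

-- ===== PORT B =====
-- stage-1 step over enumerate(call); state = (cuts, start, limit)
def joinArgsStepB (d : PySem.Dict String Int) (s : List Int × Int × Int) (jc : Int × String) : List Int × Int × Int :=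
  if jc.1 == 0 || PySem.Str.startswith jc.2 "-" || (jc.1 - s.2.1 == s.2.2 + 1) then
    (s.1 ++ [jc.1], jc.1, PySem.Dict.getD d (PySem.Str.stripChars jc.2 "-") 1)
  else s

-- stage-2 body: ' '.join(call[a:b])
def joinSlice (call : List String) (ab : Int × Int) : String :=
  PySem.Str.join " " (PySem.List.slice call (some ab.1) (some ab.2))

def join_args_py_alt (call : List String) (nargs : Option (List (String × Int))) : List String :=
  let d : PySem.Dict String Int := PySem.Dict.mk (nargs.getD [])
  let r := (PySem.List.enumerate call).foldl (joinArgsStepB d) ([], 0, 0)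
  (r.1.zip (r.1.tail ++ [(call.length : Int)])).map (joinSlice call)

-- ===== PRECONDITION & SPEC =====
-- Pre_ excludes exactly the inputs where A's assert raises AssertionError: some nargs key starts with '-'
def Pre_join_args_py (call : List String) (nargs : Option (List (String × Int))) : Prop :=
  ∀ p ∈ nargs.getD [], PySem.Str.startswith p.1 "-" = false
instance (call : List String) (nargs : Option (List (String × Int))) : Decidable (Pre_join_args_py call nargs) := by unfold Pre_join_args_py; infer_instance

def pvWitness_join_args_py : List String × (Option (List (String × Int))) :=
  (["-x", "a", "b", "--y", "c"], some [("x", 2), ("y", 0)])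

def Spec_join_args_py (call : List String) (nargs : Option (List (String × Int))) (out : List String) : Prop := out = join_args_py_alt call nargs
instance (call : List String) (nargs : Option (List (String × Int))) (out : List String) : Decidable (Spec_join_args_py call nargs out) := by unfold Spec_join_args_py; infer_instance

-- ===== CLAIM (what is proved, stated in full; the proofs are below) =====
def Claim_equal_join_args_py : Prop := ∀ (call : List String) (nargs : Option (List (String × Int))), Dom_join_args_py call nargs → Pre_join_args_py call nargs → Spec_join_args_py call nargs (join_args_py call nargs)

-- ===== LEMMAS AND PROOFS =====

-- strip('--') and strip('-') strip the same character set
theorem stripChars_dashdash (s : String) :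
    PySem.Str.stripChars s "--" = PySem.Str.stripChars s "-" := by
  have hp : (fun c => ("--".toList).contains c) = (fun c => ("-".toList).contains c) := by
    funext c
    show (['-', '-'] : List Char).contains c = (['-'] : List Char).contains c
    simp only [List.contains_cons, List.contains_nil, Bool.or_false, Bool.or_self]
  simp only [PySem.Str.stripChars, PySem.Chars.stripChars, hp]

-- extending the tail of a nonempty list by one element appends one pair to zip-with-tail
theorem zip_tail_snoc {α : Type} (prev : List α) (s x : α) :
    (prev ++ [s]).zip ((prev ++ [s]).tail ++ [x])
      = (prev ++ [s]).zip (prev ++ [s]).tail ++ [(s, x)] := by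
  induction prev with
  | nil => simp
  | cons a t ih =>
      cases t with
      | nil => simp
      | cons b t2 =>
          simp only [List.cons_append, List.zip_cons_cons, List.tail_cons] at *
          rw [ih]

-- appending a new cut appends one pair to zip-with-tail
theorem pairs_snoc {α : Type} (prev : List α) (s x : α) :
    ((prev ++ [s]) ++ [x]).zip (((prev ++ [s]) ++ [x]).tail)
      = (prev ++ [s]).zip ((prev ++ [s]).tail) ++ [(s, x)] := by
  have htail : ((prev ++ [s]) ++ [x]).tail = (prev ++ [s]).tail ++ [x] := by
    cases prev <;> simp
  rw [htail]
  have hlen : (prev ++ [s]).length = ((prev ++ [s]).tail ++ [x]).length := by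
    cases prev <;> simp
  have h0 : ((prev ++ [s]).tail ++ [x]) = ((prev ++ [s]).tail ++ [x]) ++ ([] : List α) := by simp
  rw [h0, List.zip_append hlen, zip_tail_snoc]
  simp

-- main loop correspondence: A's fold-and-flush from a nonempty current group equals
-- B's stage-1 cut recording followed by stage-2 slice rendering
theorem joinArgs_loop (d : PySem.Dict String Int) (call : List String) :
    ∀ (rest : List String) (j start : Nat) (prev : List Int) (limit : Int) (out cur : List String),
      rest = call.drop j →
      j ≤ call.length →
      start ≤ j →
      cur = (call.drop start).take (j - start) →
      cur ≠ [] →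
      limit = PySem.Dict.getD d (PySem.Str.stripChars (cur.headD "") "-") 1 →
      out = ((prev ++ [(start : Int)]).zip (prev ++ [(start : Int)]).tail).map (joinSlice call) →
      (let r := rest.foldl (joinArgsStepA d) (out, cur);
       if r.2 ≠ [] then r.1 ++ [PySem.Str.join " " r.2] else r.1)
      = (let rb := (PySem.List.enumerate rest (j : Int)).foldl (joinArgsStepB d)
            (prev ++ [(start : Int)], (start : Int), limit);
         (rb.1.zip (rb.1.tail ++ [(call.length : Int)])).map (joinSlice call)) := by
  intro rest
  induction rest with
  | nil =>
      intro j start prev limit out cur h1 hj hsj hcur hne hl hout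
      have hjn : j = call.length := by
        have := List.drop_eq_nil_iff.mp h1.symm
        omega
      simp only [List.foldl, PySem.List.enumerate_nil]
      rw [if_pos hne, hout, zip_tail_snoc, List.map_append]
      congr 1
      have : joinSlice call ((start : Int), (call.length : Int)) = PySem.Str.join " " cur := by
        unfold joinSlice
        rw [PySem.List.slice_natCast, hcur, hjn]
      simp [this]
  | cons c rest' ih =>
      intro j start prev limit out cur h1 hj hsj hcur hne hl hout
      have hjlt : j < call.length := by
        by_contra h
        have : call.drop j = [] := List.drop_eq_nil_iff.mpr (by omega)
        rw [this] at h1; exact absurd h1 (by simp)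
      have hdrop1 : call.drop (j + 1) = rest' := by
        rw [← List.tail_drop, ← h1]; rfl
      have hcj : call[j]? = some c := by
        have : (call.drop j)[0]? = some c := by rw [← h1]; simp
        rw [List.getElem?_drop] at this
        simpa using this
      have hlc : cur.length = j - start := by
        rw [hcur]; simp [List.length_take, List.length_drop]; omega
      have hj1 : 1 ≤ j := by
        have : cur.length ≠ 0 := by simpa [List.length_eq_zero_iff] using hne
        omega
      have hcastlen : (cur.length : Int) = (j : Int) - (start : Int) := by
        rw [hlc]; omega
      -- the two loop conditions agree
      have hcondA : (PySem.Str.startswith c "-" ||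
          (PySem.Dict.getD d (PySem.Str.stripChars (cur.headD "") "--") 1 + 1 == (cur.length : Int)))
          = (((j : Int)) == 0 || PySem.Str.startswith c "-" ||
             ((j : Int) - (start : Int) == limit + 1)) := by
        rw [stripChars_dashdash, ← hl, hcastlen]
        have hj0 : (((j : Int)) == 0) = false := by simp; omega
        rw [hj0, Bool.false_or]
        by_cases h : limit + 1 = (j : Int) - (start : Int)
        · simp [h]
        · rw [show ((limit + 1 : Int) == (j : Int) - (start : Int)) = false by simp [h],
              show (((j : Int) - (start : Int)) == limit + 1) = false by simp [Ne.symm h]]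
      simp only [List.foldl, PySem.List.enumerate_cons]
      by_cases hcut : (((j : Int)) == 0 || PySem.Str.startswith c "-" ||
          ((j : Int) - (start : Int) == limit + 1)) = true
      · -- flush / new cut
        have hstepA : joinArgsStepA d (out, cur) c = (out ++ [PySem.Str.join " " cur], [c]) := by
          simp only [joinArgsStepA]
          rw [if_pos (List.length_pos_iff.mpr hne), if_pos (hcondA ▸ hcut)]
        have hstepB : joinArgsStepB d (prev ++ [(start : Int)], (start : Int), limit) ((j : Int), c)
            = ((prev ++ [(start : Int)]) ++ [(j : Int)], (j : Int),
               PySem.Dict.getD d (PySem.Str.stripChars c "-") 1) := by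
          simp only [joinArgsStepB]
          rw [if_pos hcut]
        rw [hstepA, hstepB]
        have hrec := ih (j + 1) j (prev ++ [(start : Int)])
          (PySem.Dict.getD d (PySem.Str.stripChars c "-") 1)
          (out ++ [PySem.Str.join " " cur]) [c]
          hdrop1.symm (by omega) (by omega)
          (by rw [← h1]; simp) (by simp) (by simp)
          (by
            rw [hout, pairs_snoc, List.map_append]
            congr 1
            have : joinSlice call ((start : Int), (j : Int)) = PySem.Str.join " " cur := by
              unfold joinSlice
              rw [PySem.List.slice_natCast, hcur]
            simp [this])
        push_cast at hrec
        exact hrec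
      · -- extend the current group, no cut
        have hstepA : joinArgsStepA d (out, cur) c = (out, cur ++ [c]) := by
          simp only [joinArgsStepA]
          rw [if_pos (List.length_pos_iff.mpr hne), if_neg (by rw [hcondA]; exact hcut)]
        have hstepB : joinArgsStepB d (prev ++ [(start : Int)], (start : Int), limit) ((j : Int), c)
            = (prev ++ [(start : Int)], (start : Int), limit) := by
          simp only [joinArgsStepB]
          rw [if_neg hcut]
        rw [hstepA, hstepB]
        have hcur' : cur ++ [c] = (call.drop start).take (j + 1 - start) := by
          have h2 : j + 1 - start = (j - start) + 1 := by omega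
          rw [h2, List.take_add_one, ← hcur]
          congr 1
          rw [List.getElem?_drop]
          have : start + (j - start) = j := by omega
          rw [this, hcj]
          rfl
        have hhead : (cur ++ [c]).headD "" = cur.headD "" := by
          cases cur with
          | nil => exact absurd rfl hne
          | cons a l => simp
        have hrec := ih (j + 1) start prev limit out (cur ++ [c])
          hdrop1.symm (by omega) (by omega) hcur' (by simp)
          (by rw [hhead]; exact hl) hout
        push_cast at hrec
        exact hrec

-- ===== VERDICT (by name: the statement is the Claim_ definition above) =====
theorem join_args_py_spec : Claim_equal_join_args_py := by
  unfold Claim_equal_join_args_py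
  intro call nargs _ _
  unfold Spec_join_args_py join_args_py join_args_py_alt
  cases call with
  | nil => simp [PySem.List.enumerate_nil]
  | cons c cs =>
      have hstepA : joinArgsStepA (PySem.Dict.mk (nargs.getD [])) ([], []) c = ([], [c]) := by
        simp only [joinArgsStepA]
        rw [if_neg (by simp)]
        simp
      have hstepB : joinArgsStepB (PySem.Dict.mk (nargs.getD [])) ([], 0, 0) ((0 : Int), c)
          = ([(0 : Int)], (0 : Int), PySem.Dict.getD (PySem.Dict.mk (nargs.getD []))
              (PySem.Str.stripChars c "-") 1) := by
        simp only [joinArgsStepB]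
        rw [if_pos (by simp)]
        simp
      simp only [List.foldl, PySem.List.enumerate_cons, hstepA, hstepB]
      have hrec := joinArgs_loop (PySem.Dict.mk (nargs.getD [])) (c :: cs) cs 1 0 []
        (PySem.Dict.getD (PySem.Dict.mk (nargs.getD [])) (PySem.Str.stripChars c "-") 1)
        [] [c]
        rfl (by simp) (by omega) (by simp) (by simp) (by simp) (by simp)
      push_cast at hrec
      exact hrec
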